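-- pv_equiv track=rewrite | github.com/davidchanwz/auto-qa-pipeline | visualize_exploration_log.py | get_step_category
-- ===== SOURCE A (Python) =====
-- def get_step_category(step_type: str) -> str:
--     """Categorize step types for better organization."""
--     categories = {
--         "session": [
--             "session_start",
--             "incremental_analysis_start",
--             "incremental_analysis_complete",
--         ],
--         "article": [
--             "article_analysis_start",
--             "article_analysis_complete",
--             "incremental_article_start",
--             "incremental_article_complete",
--             "incremental_article_no_operations",
--             "incremental_article_no_codes",
--         ],
--         "prompt": [
--             "prompt_generated",
--             "context_set",
--             "llm_response_received",
--             "fallback_method_used",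
--         ],
--         "code": ["code_created", "candidate_processing"],
--         "similarity": ["similarity_search"],
--         "decision": [
--             "decision_context_set",
--             "decision_prompt_generated",
--             "llm_decision_start",
--             "llm_decision_complete",
--             "decision_fallback_used",
--             "decision_error",
--         ],
--         "operation": [
--             "operation_created",
--             "operation_attempt",
--             "operation_success",
--             "operation_failure",
--         ],
--         "comparison": ["comparison_start", "comparison_complete"],
--         "codebook": [
--             "codebook_update_start",
--             "codebook_update_complete",
--             "codebook_save_start",
--             "codebook_save_success",
--         ],
--         "update": ["incremental_update_start"],
--     }
--
--     for category, types in categories.items():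
--         if step_type in types:
--             return category
--     return "other"
-- ===== SOURCE B (Python) =====
-- _STEP_TO_CATEGORY = {
--     "session_start": "session",
--     "incremental_analysis_start": "session",
--     "incremental_analysis_complete": "session",
--     "article_analysis_start": "article",
--     "article_analysis_complete": "article",
--     "incremental_article_start": "article",
--     "incremental_article_complete": "article",
--     "incremental_article_no_operations": "article",
--     "incremental_article_no_codes": "article",
--     "prompt_generated": "prompt",
--     "context_set": "prompt",
--     "llm_response_received": "prompt",
--     "fallback_method_used": "prompt",
--     "code_created": "code",
--     "candidate_processing": "code",
--     "similarity_search": "similarity",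
--     "decision_context_set": "decision",
--     "decision_prompt_generated": "decision",
--     "llm_decision_start": "decision",
--     "llm_decision_complete": "decision",
--     "decision_fallback_used": "decision",
--     "decision_error": "decision",
--     "operation_created": "operation",
--     "operation_attempt": "operation",
--     "operation_success": "operation",
--     "operation_failure": "operation",
--     "comparison_start": "comparison",
--     "comparison_complete": "comparison",
--     "codebook_update_start": "codebook",
--     "codebook_update_complete": "codebook",
--     "codebook_save_start": "codebook",
--     "codebook_save_success": "codebook",
--     "incremental_update_start": "update",
-- }
--
--
-- def get_step_category(step_type: str) -> str:
--     """Categorize step types for better organization."""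
--     return _STEP_TO_CATEGORY.get(step_type, "other")
-- ===== Notes on version B (the rewrite author's own statement) =====
-- stated objective: simpler
-- what changed: Replaced the runtime loop over a category->list dict with per-list membership tests by a single flat step->category dict built once at module load, so the body is one O(1) lookup with default 'other'.
import Mathlib
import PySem

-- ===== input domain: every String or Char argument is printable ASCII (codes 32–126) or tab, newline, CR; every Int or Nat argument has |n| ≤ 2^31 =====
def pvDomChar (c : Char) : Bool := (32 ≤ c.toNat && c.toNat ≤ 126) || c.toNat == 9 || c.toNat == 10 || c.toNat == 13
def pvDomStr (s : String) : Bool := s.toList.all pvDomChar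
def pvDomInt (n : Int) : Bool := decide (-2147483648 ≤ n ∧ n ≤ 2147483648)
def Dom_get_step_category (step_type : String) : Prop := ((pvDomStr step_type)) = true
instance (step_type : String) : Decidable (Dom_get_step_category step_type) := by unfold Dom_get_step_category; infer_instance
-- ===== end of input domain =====

-- B replaces A's loop over category lists with one flat step->category dict and a single lookup (objective: simpler).

-- ===== PORT A =====
-- A's categories dict, in insertion order, as an association list of (category, list of step types).
def pvCategoriesA : List (String × List String) :=
  [("session", ["session_start", "incremental_analysis_start", "incremental_analysis_complete"]),
   ("article", ["article_analysis_start", "article_analysis_complete", "incremental_article_start",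
                "incremental_article_complete", "incremental_article_no_operations",
                "incremental_article_no_codes"]),
   ("prompt", ["prompt_generated", "context_set", "llm_response_received", "fallback_method_used"]),
   ("code", ["code_created", "candidate_processing"]),
   ("similarity", ["similarity_search"]),
   ("decision", ["decision_context_set", "decision_prompt_generated", "llm_decision_start",
                 "llm_decision_complete", "decision_fallback_used", "decision_error"]),
   ("operation", ["operation_created", "operation_attempt", "operation_success", "operation_failure"]),
   ("comparison", ["comparison_start", "comparison_complete"]),
   ("codebook", ["codebook_update_start", "codebook_update_complete", "codebook_save_start",
                 "codebook_save_success"]),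
   ("update", ["incremental_update_start"])]

-- the 'for category, types in categories.items(): if step_type in types: return category' loop
def pvFindCatA : List (String × List String) → String → String
  | [], _ => "other"
  | (category, types) :: rest, step_type =>
      if types.contains step_type then category else pvFindCatA rest step_type

def get_step_category (step_type : String) : String :=
  pvFindCatA pvCategoriesA step_type

-- ===== PORT B =====
-- Source B's module-level flat dict _STEP_TO_CATEGORY.
def pvStepToCatB : PySem.Dict String String :=
  PySem.Dict.ofList
    [("session_start", "session"), ("incremental_analysis_start", "session"),
     ("incremental_analysis_complete", "session"),
     ("article_analysis_start", "article"), ("article_analysis_complete", "article"),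
     ("incremental_article_start", "article"), ("incremental_article_complete", "article"),
     ("incremental_article_no_operations", "article"), ("incremental_article_no_codes", "article"),
     ("prompt_generated", "prompt"), ("context_set", "prompt"),
     ("llm_response_received", "prompt"), ("fallback_method_used", "prompt"),
     ("code_created", "code"), ("candidate_processing", "code"),
     ("similarity_search", "similarity"),
     ("decision_context_set", "decision"), ("decision_prompt_generated", "decision"),
     ("llm_decision_start", "decision"), ("llm_decision_complete", "decision"),
     ("decision_fallback_used", "decision"), ("decision_error", "decision"),
     ("operation_created", "operation"), ("operation_attempt", "operation"),
     ("operation_success", "operation"), ("operation_failure", "operation"),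
     ("comparison_start", "comparison"), ("comparison_complete", "comparison"),
     ("codebook_update_start", "codebook"), ("codebook_update_complete", "codebook"),
     ("codebook_save_start", "codebook"), ("codebook_save_success", "codebook"),
     ("incremental_update_start", "update")]

def get_step_category_alt (step_type : String) : String :=
  pvStepToCatB.getD step_type "other"

-- ===== PRECONDITION & SPEC =====
def Spec_get_step_category (step_type : String) (out : String) : Prop := out = get_step_category_alt step_type
instance (step_type : String) (out : String) : Decidable (Spec_get_step_category step_type out) := by unfold Spec_get_step_category; infer_instance

-- ===== CLAIM (what is proved, stated in full; the proofs are below) =====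
def Claim_equal_get_step_category : Prop := ∀ (step_type : String), Dom_get_step_category step_type → Spec_get_step_category step_type (get_step_category step_type)

-- ===== LEMMAS AND PROOFS =====

-- ===== VERDICT (by name: the statement is the Claim_ definition above) =====
-- the flat dict has no duplicate keys, so ofList builds exactly the literal association list
set_option maxRecDepth 4000 in
theorem pvStepToCatB_eq : pvStepToCatB = PySem.Dict.mk pvStepToCatB.items := by decide

-- Dict.getD on a literal dict is a first-match scan of its items list
theorem getD_mk_eq_find? (l : List (String × String)) (s d : String) :
    (PySem.Dict.mk l).getD s d = ((l.find? (fun p => p.1 == s)).map Prod.snd).getD d := by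
  induction l with
  | nil => rfl
  | cons p rest ih =>
      obtain ⟨k, v⟩ := p
      rw [PySem.Dict.getD, PySem.Dict.get?_mk_cons, List.find?_cons]
      by_cases h : (k == s) = true
      · simp [h]
      · simp only [h, Bool.false_eq_true, if_false]
        simpa [PySem.Dict.getD] using ih

-- A's category loop is the same first-match scan of the flattened (step, category) pairs
theorem findCat_eq_find? (cats : List (String × List String)) (s : String) :
    pvFindCatA cats s =
      (((cats.flatMap (fun p => p.2.map (fun t => (t, p.1)))).find? (fun q => q.1 == s)).map
        Prod.snd).getD "other" := by
  induction cats with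
  | nil => rfl
  | cons p rest ih =>
      obtain ⟨c, ts⟩ := p
      rw [pvFindCatA, List.flatMap_cons, List.find?_append, List.find?_map]
      dsimp only
      by_cases h : ts.contains s = true
      · rw [if_pos h]
        have hmem : s ∈ ts := by simpa using h
        obtain ⟨x, hx⟩ := Option.isSome_iff_exists.mp
          ((List.find?_isSome (p := fun t => t == s)).mpr ⟨s, hmem, by simp⟩)
        have hxs : x = s := beq_iff_eq.mp (List.find?_some (p := fun t => t == s) hx)
        have hxc : List.find? ((fun q : String × String => q.1 == s) ∘ fun t => (t, c)) ts
            = some s := by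
          subst hxs; exact hx
        rw [hxc]
        rfl
      · rw [if_neg h]
        have hnone : List.find? ((fun q : String × String => q.1 == s) ∘ fun t => (t, c)) ts
            = none := by
          rw [List.find?_eq_none]
          intro x hx hbeq
          exact h (by simpa using (beq_iff_eq.mp hbeq ▸ hx))
        rw [hnone]
        exact ih

set_option maxRecDepth 4000 in
theorem get_step_category_spec : Claim_equal_get_step_category := by
  intro s _
  unfold Spec_get_step_category get_step_category get_step_category_alt
  rw [pvStepToCatB_eq, getD_mk_eq_find?, findCat_eq_find?]
  rfl
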